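-- pv_equiv track=rewrite | github.com/xymsyh/fs_api_example | class_summary.py | process
-- ===== SOURCE A (Python) =====
-- def process(data, keyword):
--     """
--     从给定数据中提取所有特定模式之间的内容，并支持多个匹配项。
--
--     :param data: 包含要处理的数据的列表，格式应为列表的列表。
--     :param keyword: 用于构造起始和结束模式的关键词。
--     :return: 提取的内容列表，格式为列表的列表。
--     """
--     # 定义更新 start_pattern 和 end_pattern 的函数
--     def update_patterns(keyword):
--         start_pattern = f"[{keyword}["
--         end_pattern = f"]{keyword}]"
--         return start_pattern, end_pattern
--
--     # 获取 start_pattern 和 end_pattern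
--     start_pattern, end_pattern = update_patterns(keyword)
--
--     summaries_extract = []
--     for cell in data:
--         # 强制转换 cell[0] 为字符串
--         cell_content = str(cell[0])
--         summaries = []
--         start_index = 0
--         while start_index != -1:
--             # 查找 start_pattern 和 end_pattern 的位置
--             start_index = cell_content.find(start_pattern, start_index)
--             end_index = cell_content.find(end_pattern, start_index)
--             if start_index != -1 and end_index != -1:
--                 # 提取并添加内容
--                 summary = cell_content[start_index + len(start_pattern):end_index]
--                 summaries.append(summary)
--                 # 更新 start_index 以在字符串中查找下一个模式
--                 start_index = end_index + len(end_pattern)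
--             else:
--                 break
--         if summaries:
--             # 用 '。' 连接多个摘要
--             summaries_extract.append(["。".join(summaries)])
--         else:
--             # 如果找不到匹配的内容，添加 "None"
--             summaries_extract.append(["N"])
--
--     return summaries_extract
-- ===== SOURCE B (Python) =====
-- def process(data, keyword):
--     start_pattern = f"[{keyword}["
--     end_pattern = f"]{keyword}]"
--     out = []
--     for cell in data:
--         s = str(cell[0])
--         # precompute every occurrence position of each pattern, once per cell
--         starts = [k for k in range(len(s)) if s.startswith(start_pattern, k)]
--         ends = [k for k in range(len(s)) if s.startswith(end_pattern, k)]
--         summaries = []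
--         i = 0
--         for a in starts:
--             if a < i:
--                 continue
--             b = next((e for e in ends if e >= a), None)
--             if b is None:
--                 break
--             summaries.append(s[a + len(start_pattern):b])
--             i = b + len(end_pattern)
--         out.append(["。".join(summaries)] if summaries else ["N"])
--     return out
-- ===== Notes on version B (the rewrite author's own statement) =====
-- stated objective: alternative
-- what changed: A's incremental while-loop of repeated str.find calls with a moving resume index is replaced by precomputing, once per cell, the full lists of occurrence positions of the start and end patterns and then selecting non-overlapping matches from those position lists.
-- outside the precondition, e.g. on process([[]], 'k'): A raises IndexError, B raises IndexError
import Mathlib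
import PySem

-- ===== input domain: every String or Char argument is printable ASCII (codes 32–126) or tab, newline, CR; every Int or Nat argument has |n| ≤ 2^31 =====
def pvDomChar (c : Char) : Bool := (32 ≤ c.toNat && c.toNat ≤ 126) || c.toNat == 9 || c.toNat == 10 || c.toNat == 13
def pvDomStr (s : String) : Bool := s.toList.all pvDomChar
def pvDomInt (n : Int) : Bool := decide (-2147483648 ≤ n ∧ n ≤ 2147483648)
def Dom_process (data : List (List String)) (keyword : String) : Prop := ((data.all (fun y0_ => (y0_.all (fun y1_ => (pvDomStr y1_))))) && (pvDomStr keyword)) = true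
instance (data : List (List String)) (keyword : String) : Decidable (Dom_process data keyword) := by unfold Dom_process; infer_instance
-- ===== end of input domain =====

-- B replaces A's incremental find/find/resume while-loop by precomputing the two full
-- occurrence-position lists of the delimiter patterns once per cell and selecting
-- non-overlapping matches from those lists (objective: alternative algorithm, same cost).
-- Both ports read only the RETURN value; neither Python mutates its arguments.

-- ===== PORT A =====
-- f"[{keyword}[" / f"]{keyword}]" as character lists (exact: ASCII concatenation)
def processUpdatePatterns (keyword : String) : List Char × List Char :=
  ('[' :: keyword.toList ++ ['['], ']' :: keyword.toList ++ [']'])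

-- the `while start_index != -1` loop of A; fuel = len(cell_content)+1 always suffices
-- (each emitting step advances start_index by at least 2, bounded by the length)
def processAStep (s sp ep : List Char) : Nat → Int → List (List Char)
  | 0, _ => []
  | fuel + 1, startIndex =>
    if startIndex = -1 then []
    else
      let si := PySem.Chars.findFrom s sp startIndex none
      let ei := PySem.Chars.findFrom s ep si none
      if si ≠ -1 ∧ ei ≠ -1 then
        PySem.List.slice s (some (si + (sp.length : Int))) (some ei)
          :: processAStep s sp ep fuel (ei + (ep.length : Int))
      else []

def process (data : List (List String)) (keyword : String) : List (List String) :=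
  let pats := processUpdatePatterns keyword
  data.map (fun cell =>
    -- str(cell[0]): cell[0] raises IndexError on an empty cell (excluded by Pre_); str() on a str is the identity
    let cellContent := ((PySem.List.pyGet? cell 0).getD "").toList
    let summaries := processAStep cellContent pats.1 pats.2 (cellContent.length + 1) 0
    if summaries ≠ [] then [String.ofList (PySem.Chars.join "。".toList summaries)] else ["N"])

-- ===== PORT B =====
-- [k for k in range(len(s)) if s.startswith(p, k)]  (s.startswith(p, k) = p occurs at k, exact for 0 ≤ k < len(s))
def processOccurrences (s p : List Char) : List Nat :=
  (List.range s.length).filter (fun k => PySem.Chars.startswith (List.drop k s) p)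

-- B's `for a in starts` loop: skip starts before i, pick the first end ≥ a, emit, resume after it
def processAltStep (s sp ep : List Char) (ends : List Nat) : List Nat → Nat → List (List Char)
  | [], _ => []
  | a :: rest, i =>
    if a < i then processAltStep s sp ep ends rest i
    else
      match ends.find? (fun e => decide (a ≤ e)) with
      | none => []
      | some b =>
          PySem.List.slice s (some ((a : Int) + (sp.length : Int))) (some (b : Int))
            :: processAltStep s sp ep ends rest (b + ep.length)

def process_alt (data : List (List String)) (keyword : String) : List (List String) :=
  let sp := '[' :: keyword.toList ++ ['[']
  let ep := ']' :: keyword.toList ++ [']']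
  data.map (fun cell =>
    let s := ((PySem.List.pyGet? cell 0).getD "").toList
    let summaries := processAltStep s sp ep (processOccurrences s ep) (processOccurrences s sp) 0
    if summaries ≠ [] then [String.ofList (PySem.Chars.join "。".toList summaries)] else ["N"])

-- ===== PRECONDITION & SPEC =====
-- Pre_ excludes only inputs on which Python A raises: a cell that is an empty list makes cell[0] an IndexError.
def Pre_process (data : List (List String)) (keyword : String) : Prop :=
  ∀ cell ∈ data, cell ≠ []
instance (data : List (List String)) (keyword : String) : Decidable (Pre_process data keyword) := by
  unfold Pre_process; infer_instance

def pvWitness_process : List (List String) × String := ([["x[k[ab]k[cd]k]y"], ["no match"]], "k")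

def Spec_process (data : List (List String)) (keyword : String) (out : List (List String)) : Prop := out = process_alt data keyword
instance (data : List (List String)) (keyword : String) (out : List (List String)) : Decidable (Spec_process data keyword out) := by unfold Spec_process; infer_instance

-- ===== CLAIM (what is proved, stated in full; the proofs are below) =====
def Claim_equal_process : Prop := ∀ (data : List (List String)) (keyword : String), Dom_process data keyword → Pre_process data keyword → Spec_process data keyword (process data keyword)

-- ===== LEMMAS AND PROOFS =====

-- membership in the occurrence list = the pattern occurs there
theorem mem_processOccurrences {s p : List Char} {k : Nat} :
    k ∈ processOccurrences s p ↔ k < s.length ∧ p <+: s.drop k := by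
  simp [processOccurrences, List.mem_filter, List.mem_range, PySem.Chars.startswith_iff]

theorem processOccurrences_pairwise (s p : List Char) :
    (processOccurrences s p).Pairwise (· < ·) := by
  exact List.Pairwise.sublist List.filter_sublist List.pairwise_lt_range

-- first element ≥ i of a strictly increasing list
theorem find?_ge_eq_some {i m : Nat} :
    ∀ (l : List Nat), l.Pairwise (· < ·) → m ∈ l → i ≤ m → (∀ x ∈ l, i ≤ x → m ≤ x) →
      l.find? (fun x => decide (i ≤ x)) = some m := by
  intro l
  induction l with
  | nil => intro _ hm; cases hm
  | cons h t ih =>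
    intro hl hm him hmin
    by_cases hih : i ≤ h
    · have hmh : m = h := by
        rcases List.mem_cons.mp hm with hm | hm
        · exact hm
        · exact le_antisymm (hmin h (by simp) hih) (le_of_lt ((List.pairwise_cons.mp hl).1 m hm))
      rw [List.find?_cons_of_pos (by simpa using hih), hmh]
    · have hmh : m ≠ h := fun e => hih (e ▸ him)
      have hm' : m ∈ t := by
        rcases List.mem_cons.mp hm with hm | hm; exact absurd hm hmh; exact hm
      rw [List.find?_cons_of_neg (by simpa using hih)]
      exact ih (List.pairwise_cons.mp hl).2 hm' him (fun x hx hix => hmin x (List.mem_cons_of_mem _ hx) hix)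

-- an infix of s.drop i is exactly a prefix of some s.drop k with k ≥ i
theorem infix_drop_iff {p s : List Char} {i : Nat} :
    p <:+: s.drop i ↔ ∃ k, i ≤ k ∧ p <+: s.drop k := by
  constructor
  · intro h
    rcases List.infix_iff_prefix_suffix.mp h with ⟨u, hpu, hus⟩
    obtain ⟨n, hn⟩ : ∃ n, u = (s.drop i).drop n :=
      ⟨(s.drop i).length - u.length, List.suffix_iff_eq_drop.mp hus⟩
    refine ⟨i + n, by omega, ?_⟩
    have h2 : (s.drop i).drop n = s.drop (i + n) := List.drop_drop ..
    rw [← h2, ← hn]; exact hpu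
  · rintro ⟨k, hik, hpk⟩
    have hsfx : s.drop k <:+ s.drop i := by
      have : s.drop k = (s.drop i).drop (k - i) := by
        rw [List.drop_drop]; congr 1; omega
      rw [this]; exact List.drop_suffix _ _
    exact List.infix_iff_prefix_suffix.mpr ⟨s.drop k, hpk, hsfx⟩

-- characterisation of Python's find(sub, i): the least occurrence ≥ i, else -1
theorem findFrom_eq_occ {s p : List Char} (hp : p ≠ []) {i : Nat} (hi : i ≤ s.length) :
    PySem.Chars.findFrom s p (i : Int) none =
      (match (processOccurrences s p).find? (fun k => decide (i ≤ k)) with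
        | none => -1
        | some k => (k : Int)) := by
  by_cases h : PySem.Chars.findFrom s p (i : Int) none = -1
  · rw [h]
    have hno := (PySem.Chars.findFrom_natCast_eq_neg_one_iff s p i hi).mp h
    have hfn : (processOccurrences s p).find? (fun k => decide (i ≤ k)) = none := by
      rw [List.find?_eq_none]
      intro x hx
      simp only [decide_eq_true_eq]
      intro hix
      exact hno (infix_drop_iff.mpr ⟨x, hix, (mem_processOccurrences.mp hx).2⟩)
    rw [hfn]
  · obtain ⟨hge, hpre, hmin⟩ := PySem.Chars.findFrom_natCast_spec s p i hi h
    set r := PySem.Chars.findFrom s p (i : Int) none with hr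
    have hr0 : 0 ≤ r := le_trans (by exact_mod_cast Nat.zero_le i) hge
    have hrlen : r.toNat < s.length := by
      have h1 : p.length ≤ (s.drop r.toNat).length := hpre.length_le
      have h2 : 0 < p.length := List.length_pos_iff.mpr hp
      simp [List.length_drop] at h1
      omega
    have hfs : (processOccurrences s p).find? (fun k => decide (i ≤ k)) = some r.toNat := by
      apply find?_ge_eq_some _ (processOccurrences_pairwise s p)
          (mem_processOccurrences.mpr ⟨hrlen, hpre⟩) (by omega)
      intro x hx hix
      by_contra hlt
      exact hmin x hix (by omega) (mem_processOccurrences.mp hx).2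
    rw [hfs]
    exact (Int.toNat_of_nonneg hr0).symm

-- main loop invariant: A's find-loop equals B's walk over the remaining start occurrences.
-- Invariant: the start occurrences split as pre ++ rest with everything in pre below the
-- current resume index i; fuel ≥ len+1-i suffices because each emitted match moves i past b.
theorem step_eq (s sp ep : List Char) (hsp : sp ≠ []) (hep : ep ≠ []) :
    ∀ rest pre i fuel, processOccurrences s sp = pre ++ rest →
      (∀ x ∈ pre, x < i) → i ≤ s.length → s.length + 1 - i ≤ fuel →
      processAStep s sp ep fuel (i : Int) =
        processAltStep s sp ep (processOccurrences s ep) rest i := by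
  intro rest
  induction rest with
  | nil =>
    intro pre i fuel hocc hpre hi hfuel
    obtain ⟨f, rfl⟩ : ∃ f, fuel = f + 1 := ⟨fuel - 1, by omega⟩
    have hsi : PySem.Chars.findFrom s sp (i : Int) none = -1 := by
      rw [findFrom_eq_occ hsp hi]
      have : (processOccurrences s sp).find? (fun k => decide (i ≤ k)) = none := by
        rw [List.find?_eq_none]
        intro x hx
        have : x < i := hpre x (by simpa [hocc] using hx)
        simpa using by omega
      rw [this]
    simp [processAStep, processAltStep, hsi, show ¬((i : Int) = -1) by omega]
  | cons a rest' ih =>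
    intro pre i fuel hocc hpre hi hfuel
    obtain ⟨f, rfl⟩ : ∃ f, fuel = f + 1 := ⟨fuel - 1, by omega⟩
    have hpw := processOccurrences_pairwise s sp
    rw [hocc] at hpw
    have hpw' := List.pairwise_append.mp hpw
    have hamem : a ∈ processOccurrences s sp := by simp [hocc]
    have halen : a < s.length := (mem_processOccurrences.mp hamem).1
    by_cases hai : a < i
    · -- B skips a; A is unchanged
      rw [show processAltStep s sp ep (processOccurrences s ep) (a :: rest') i
            = processAltStep s sp ep (processOccurrences s ep) rest' i by
          simp [processAltStep, hai]]
      exact ih (pre ++ [a]) i (f + 1) (by simpa using hocc)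
        (by intro x hx; rcases List.mem_append.mp hx with h | h
            · exact hpre x h
            · simpa using (by simpa using h : x = a) ▸ hai)
        hi hfuel
    · rw [not_lt] at hai
      -- A's find(start_pattern, i) lands exactly on a
      have hfsp : (processOccurrences s sp).find? (fun k => decide (i ≤ k)) = some a := by
        apply find?_ge_eq_some _ (processOccurrences_pairwise s sp) hamem hai
        intro x hx hix
        rw [hocc] at hx
        rcases List.mem_append.mp hx with h | h
        · exact absurd hix (by simpa using hpre x h)
        · rcases List.mem_cons.mp h with rfl | h
          · exact le_refl _
          · exact le_of_lt ((List.pairwise_cons.mp hpw'.2.1).1 x h)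
      have hsi : PySem.Chars.findFrom s sp (i : Int) none = (a : Int) := by
        rw [findFrom_eq_occ hsp hi, hfsp]
      have hei : PySem.Chars.findFrom s ep ((a : Nat) : Int) none =
          (match (processOccurrences s ep).find? (fun e => decide (a ≤ e)) with
            | none => -1
            | some k => (k : Int)) := findFrom_eq_occ hep (le_of_lt halen)
      cases hend : (processOccurrences s ep).find? (fun e => decide (a ≤ e)) with
      | none =>
        -- no end pattern after a: both loops stop
        rw [hend] at hei
        simp [processAStep, processAltStep, hsi, hei, hend,
          show ¬((i : Int) = -1) by omega, if_neg hai.not_gt]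
      | some b =>
        rw [hend] at hei
        have hb := List.find?_some hend
        have hbmem := List.mem_of_find?_eq_some hend
        have hab : a ≤ b := by simpa using hb
        obtain ⟨hblen, hbpre⟩ := mem_processOccurrences.mp hbmem
        have hblen2 : b + ep.length ≤ s.length := by
          have h1 : ep.length ≤ (s.drop b).length := hbpre.length_le
          simp [List.length_drop] at h1
          omega
        have hepos : 0 < ep.length := List.length_pos_iff.mpr hep
        have htail := ih (pre ++ [a]) (b + ep.length) f
          (by simpa using hocc)
          (by intro x hx; rcases List.mem_append.mp hx with h | h
              · have := hpre x h; omega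
              · have : x = a := by simpa using h
                omega)
          hblen2 (by omega)
        rw [Nat.cast_add] at htail
        have hei2 : PySem.Chars.findFrom s ep ((a : Nat) : Int) none = (b : Int) := hei
        simp only [processAStep, processAltStep, hsi, hei2, hend,
          if_neg (show ¬((i : Int) = -1) by omega), if_neg hai.not_gt]
        rw [if_pos (by constructor <;> omega)]
        exact congrArg _ htail

-- ===== VERDICT (by name: the statement is the Claim_ definition above) =====
-- per-cell equality, lifted over the outer map
theorem process_spec : Claim_equal_process := by
  intro data keyword _hdom _hpre
  unfold Spec_process process process_alt
  apply List.map_congr_left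
  intro cell _hcell
  have hsp : ('[' :: keyword.toList ++ ['[']) ≠ [] := by simp
  have hep : (']' :: keyword.toList ++ [']']) ≠ [] := by simp
  have h := step_eq (((PySem.List.pyGet? cell 0).getD "").toList)
      ('[' :: keyword.toList ++ ['[']) (']' :: keyword.toList ++ [']']) hsp hep
      (processOccurrences (((PySem.List.pyGet? cell 0).getD "").toList) ('[' :: keyword.toList ++ ['[']))
      [] 0 ((((PySem.List.pyGet? cell 0).getD "").toList).length + 1)
      rfl (by simp) (by omega) (by omega)
  simp only [processUpdatePatterns]
  rw [show ((0 : Nat) : Int) = (0 : Int) by norm_num] at h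
  rw [h]
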